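-- pv_equiv track=rewrite | github.com/hulbji/couyun | shi_rhythm.py | which_sentence
-- ===== SOURCE A (Python) =====
-- def which_sentence(first_sen_type: int, how_many: int, first_yayun: int, poem_pingze: int) -> list[int]:
--     """
--     根据首句推测后续句的格式。
--     Args:
--         first_sen_type: 首句的句式格式代码
--         how_many: 诗的句数
--         first_yayun: 首句是否押韵，-1押仄韵 1押平韵 0不押韵
--         poem_pingze: 诗歌的平仄代码
--     Returns:
--         每个句子对应的规则代码的列表
--     """
--     sen_list = []
--     turn_rule = {1: 2, 2: 3, 3: 4, 4: 1, 5: 6, 6: 7, 7: 8, 8: 5}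
--     first_rule = {1: 3, 2: 4, 3: 1, 4: 2, 5: 7, 6: 8, 7: 5, 8: 6}
--     ze_turn_rule = {2: 1, 3: 2, 4: 3, 1: 4, 6: 5, 7: 6, 8: 7, 5: 8}
--     ze_first_rule = {3: 1, 4: 2, 1: 3, 2: 4, 7: 5, 8: 6, 5: 7, 6: 8}
--     for _ in range(how_many):
--         sen_list.append(first_sen_type)
--         if first_yayun and _ == 0:  # 若首句押韵
--             if poem_pingze == 1:
--                 first_sen_type = first_rule[first_sen_type]
--             else:
--                 first_sen_type = ze_first_rule[first_sen_type]
--         else: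
--             if poem_pingze == 1:
--                 first_sen_type = turn_rule[first_sen_type]
--             else:
--                 first_sen_type = ze_turn_rule[first_sen_type]
--     return sen_list
-- ===== SOURCE B (Python) =====
-- def which_sentence(first_sen_type: int, how_many: int, first_yayun: int, poem_pingze: int) -> list[int]:
--     """Closed-form version: the rule codes cycle with period 4 inside {1..4} or {5..8};
--     the first hop is +2 when the first sentence rhymes, otherwise one step in the
--     ping (+1) or ze (-1) direction, and every later hop is that step."""
--     if how_many <= 0:
--         return []
--     base = 1 if first_sen_type <= 4 else 5
--     pos = first_sen_type - base
--     step = 1 if poem_pingze == 1 else -1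
--     first_delta = 2 if first_yayun else step
--     return [first_sen_type] + [base + (pos + first_delta + (i - 1) * step) % 4
--                                for i in range(1, how_many)]
-- ===== Notes on version B (the rewrite author's own statement) =====
-- stated objective: simpler
-- what changed: Replaces the four transition dictionaries and the stateful per-iteration loop with a direct closed form: the rule codes cycle with period 4 inside {1..4}/{5..8}, so each later element is base + (pos + first_delta + (i-1)*step) mod 4.
import Mathlib
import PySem

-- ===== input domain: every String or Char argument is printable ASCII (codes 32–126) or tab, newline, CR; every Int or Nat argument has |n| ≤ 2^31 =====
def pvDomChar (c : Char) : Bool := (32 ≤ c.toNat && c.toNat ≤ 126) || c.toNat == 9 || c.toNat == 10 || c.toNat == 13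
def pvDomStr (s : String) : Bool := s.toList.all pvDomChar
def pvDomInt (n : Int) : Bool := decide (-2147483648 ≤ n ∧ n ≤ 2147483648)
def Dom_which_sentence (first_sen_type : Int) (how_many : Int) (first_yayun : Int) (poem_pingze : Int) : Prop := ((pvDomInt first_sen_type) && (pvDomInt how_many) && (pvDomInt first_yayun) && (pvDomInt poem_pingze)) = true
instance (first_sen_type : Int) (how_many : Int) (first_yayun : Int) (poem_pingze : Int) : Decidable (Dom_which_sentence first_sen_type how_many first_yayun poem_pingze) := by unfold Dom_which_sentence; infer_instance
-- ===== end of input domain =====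

-- B replaces A's four transition dictionaries and stateful loop by a closed-form
-- period-4 modular formula (objective: simpler).

-- ===== PORT A =====
def pvTurnRule : PySem.Dict Int Int :=
  PySem.Dict.ofList [(1,2),(2,3),(3,4),(4,1),(5,6),(6,7),(7,8),(8,5)]
def pvFirstRule : PySem.Dict Int Int :=
  PySem.Dict.ofList [(1,3),(2,4),(3,1),(4,2),(5,7),(6,8),(7,5),(8,6)]
def pvZeTurnRule : PySem.Dict Int Int :=
  PySem.Dict.ofList [(2,1),(3,2),(4,3),(1,4),(6,5),(7,6),(8,7),(5,8)]
def pvZeFirstRule : PySem.Dict Int Int :=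
  PySem.Dict.ofList [(3,1),(4,2),(1,3),(2,4),(7,5),(8,6),(5,7),(6,8)]

-- loop body of A; `d[k]` is ported as `getD d k 0`: the KeyError inputs (key not in
-- 1..8) are excluded by Pre_which_sentence, so the default is never hit inside Pre_.
def pvWsBody (first_yayun poem_pingze : Int) (st : List Int × Int) (i : Int) : List Int × Int :=
  let sen_list := st.1 ++ [st.2]
  let next :=
    if first_yayun ≠ 0 ∧ i = 0 then
      if poem_pingze = 1 then pvFirstRule.getD st.2 0 else pvZeFirstRule.getD st.2 0
    else
      if poem_pingze = 1 then pvTurnRule.getD st.2 0 else pvZeTurnRule.getD st.2 0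
  (sen_list, next)

def which_sentence (first_sen_type : Int) (how_many : Int) (first_yayun : Int) (poem_pingze : Int) : List Int :=
  ((PySem.List.pyRange 0 how_many 1).foldl (pvWsBody first_yayun poem_pingze) ([], first_sen_type)).1

-- ===== PORT B =====
def which_sentence_alt (first_sen_type : Int) (how_many : Int) (first_yayun : Int) (poem_pingze : Int) : List Int :=
  if how_many ≤ 0 then []
  else
    let base : Int := if first_sen_type ≤ 4 then 1 else 5
    let pos : Int := first_sen_type - base
    let step : Int := if poem_pingze = 1 then 1 else -1
    let first_delta : Int := if first_yayun ≠ 0 then 2 else step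
    first_sen_type ::
      (PySem.List.pyRange 1 how_many 1).map
        (fun i => base + PySem.Int.mod (pos + first_delta + (i - 1) * step) 4)

-- ===== PRECONDITION & SPEC =====
-- Pre_ excludes exactly the inputs on which A raises KeyError: how_many ≥ 1 with a
-- first_sen_type outside 1..8 (the dictionaries have keys 1..8 only).
def Pre_which_sentence (first_sen_type : Int) (how_many : Int) (first_yayun : Int) (poem_pingze : Int) : Prop :=
  how_many ≤ 0 ∨ (1 ≤ first_sen_type ∧ first_sen_type ≤ 8)
instance (first_sen_type : Int) (how_many : Int) (first_yayun : Int) (poem_pingze : Int) : Decidable (Pre_which_sentence first_sen_type how_many first_yayun poem_pingze) := by unfold Pre_which_sentence; infer_instance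

def pvWitness_which_sentence : Int × Int × Int × Int := (1, 4, 1, 1)

def Spec_which_sentence (first_sen_type : Int) (how_many : Int) (first_yayun : Int) (poem_pingze : Int) (out : List Int) : Prop := out = which_sentence_alt first_sen_type how_many first_yayun poem_pingze
instance (first_sen_type : Int) (how_many : Int) (first_yayun : Int) (poem_pingze : Int) (out : List Int) : Decidable (Spec_which_sentence first_sen_type how_many first_yayun poem_pingze out) := by unfold Spec_which_sentence; infer_instance

-- ===== CLAIM (what is proved, stated in full; the proofs are below) =====
def Claim_equal_which_sentence : Prop := ∀ (first_sen_type : Int) (how_many : Int) (first_yayun : Int) (poem_pingze : Int), Dom_which_sentence first_sen_type how_many first_yayun poem_pingze → Pre_which_sentence first_sen_type how_many first_yayun poem_pingze → Spec_which_sentence first_sen_type how_many first_yayun poem_pingze (which_sentence first_sen_type how_many first_yayun poem_pingze)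

-- ===== LEMMAS AND PROOFS =====

-- a per-step turn lookup on s in 1..8 is a +step move in the period-4 cycle
theorem pv_turn_val (pz s : Int) (h1 : 1 ≤ s) (h8 : s ≤ 8) :
    (if pz = 1 then pvTurnRule.getD s 0 else pvZeTurnRule.getD s 0)
      = (if s ≤ 4 then (1:Int) else 5)
        + PySem.Int.mod (s - (if s ≤ 4 then (1:Int) else 5) + (if pz = 1 then 1 else -1)) 4 := by
  by_cases hp : pz = 1
  · subst hp; interval_cases s <;> decide
  · simp only [if_neg hp]; interval_cases s <;> decide

-- the first-rhyme lookup on s in 1..8 is a +2 move in the period-4 cycle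
theorem pv_first_val (pz s : Int) (h1 : 1 ≤ s) (h8 : s ≤ 8) :
    (if pz = 1 then pvFirstRule.getD s 0 else pvZeFirstRule.getD s 0)
      = (if s ≤ 4 then (1:Int) else 5)
        + PySem.Int.mod (s - (if s ≤ 4 then (1:Int) else 5) + 2) 4 := by
  by_cases hp : pz = 1
  · subst hp; interval_cases s <;> decide
  · simp only [if_neg hp]; interval_cases s <;> decide

theorem pv_turn_val_p (pz base p : Int) (hb : base = 1 ∨ base = 5) :
    (if pz = 1 then pvTurnRule.getD (base + PySem.Int.mod p 4) 0
     else pvZeTurnRule.getD (base + PySem.Int.mod p 4) 0)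
      = base + PySem.Int.mod (p + (if pz = 1 then 1 else -1)) 4 := by
  have h0 : 0 ≤ PySem.Int.mod p 4 := PySem.Int.mod_nonneg p (by norm_num)
  have h4 : PySem.Int.mod p 4 < 4 := PySem.Int.mod_lt p (by norm_num)
  have hs1 : 1 ≤ base + PySem.Int.mod p 4 := by rcases hb with h | h <;> omega
  have hs8 : base + PySem.Int.mod p 4 ≤ 8 := by rcases hb with h | h <;> omega
  rw [pv_turn_val pz (base + PySem.Int.mod p 4) hs1 hs8]
  have hbif : (if base + PySem.Int.mod p 4 ≤ 4 then (1:Int) else 5) = base := by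
    rcases hb with h | h
    · rw [if_pos (by omega)]; omega
    · rw [if_neg (by omega)]; omega
  rw [hbif]
  have hsub : base + PySem.Int.mod p 4 - base = PySem.Int.mod p 4 := by ring
  rw [hsub]
  congr 1
  simp only [PySem.Int.mod_eq_emod_of_pos (show (0:Int) < 4 by norm_num)]
  omega

-- tail of A's loop (indices ≠ 0): pure turn steps, traced in closed form
theorem pv_tail_fold (fy pz base : Int) (hb : base = 1 ∨ base = 5) :
    ∀ (L : List Int), (∀ i ∈ L, i ≠ 0) → ∀ (acc : List Int) (p : Int),
      ((L.foldl (pvWsBody fy pz) (acc, base + PySem.Int.mod p 4)).1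
        = acc ++ (List.range L.length).map
            (fun (j : Nat) => base + PySem.Int.mod (p + (j : Int) * (if pz = 1 then 1 else -1)) 4)) := by
  intro L
  induction L with
  | nil => intro _ acc p; simp
  | cons i L ih =>
    intro hL acc p
    have hi : i ≠ 0 := hL i (List.mem_cons_self ..)
    have hcond : ¬ (fy ≠ 0 ∧ i = 0) := by simp [hi]
    have hstep : pvWsBody fy pz (acc, base + PySem.Int.mod p 4) i
        = (acc ++ [base + PySem.Int.mod p 4],
           base + PySem.Int.mod (p + (if pz = 1 then 1 else -1)) 4) := by
      simp only [pvWsBody, if_neg hcond]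
      rw [pv_turn_val_p pz base p hb]
    rw [List.foldl_cons, hstep, ih (fun j hj => hL j (List.mem_cons_of_mem _ hj))]
    rw [List.length_cons, List.range_succ_eq_map, List.map_cons, List.map_map]
    simp only [Nat.cast_zero, zero_mul, add_zero, List.append_assoc, List.singleton_append]
    congr 2
    apply List.map_congr_left
    intro j _
    simp only [Function.comp_apply, Nat.cast_succ]
    congr 2
    ring

-- A's loop in closed form on a valid first code
theorem pv_main (fst hm fy pz base : Int) (hb : base = 1 ∨ base = 5)
    (hlo : base ≤ fst) (hhi : fst ≤ base + 3) (hhm : 0 < hm) :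
    which_sentence fst hm fy pz
      = fst :: (List.range (hm - 1).toNat).map
          (fun (j : Nat) => base + PySem.Int.mod
            ((fst - base) + (if fy ≠ 0 then 2 else (if pz = 1 then 1 else -1))
              + (j : Int) * (if pz = 1 then 1 else -1)) 4) := by
  have h18 : 1 ≤ fst ∧ fst ≤ 8 := by rcases hb with h | h <;> omega
  have hfeq : fst = base + PySem.Int.mod (fst - base) 4 := by
    rw [PySem.Int.mod_eq_emod_of_pos (show (0:Int) < 4 by norm_num)]; omega
  have hbif : (if fst ≤ 4 then (1:Int) else 5) = base := by
    rcases hb with h | h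
    · rw [if_pos (by omega)]; omega
    · rw [if_neg (by omega)]; omega
  have hfirst : pvWsBody fy pz ([], fst) 0
      = ([fst], base + PySem.Int.mod
          ((fst - base) + (if fy ≠ 0 then 2 else (if pz = 1 then 1 else -1))) 4) := by
    by_cases hfy : fy = 0
    · simp only [pvWsBody, hfy, ne_eq, not_true_eq_false, false_and, if_false]
      refine Prod.ext ?_ ?_
      · simp
      · show (if pz = 1 then pvTurnRule.getD fst 0 else pvZeTurnRule.getD fst 0) = _
        conv_lhs => rw [hfeq]
        exact pv_turn_val_p pz base (fst - base) hb
    · simp only [pvWsBody, ne_eq, hfy, not_false_eq_true, true_and, if_pos]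
      refine Prod.ext ?_ ?_
      · simp
      · show (if pz = 1 then pvFirstRule.getD fst 0 else pvZeFirstRule.getD fst 0) = _
        rw [pv_first_val pz fst h18.1 h18.2, hbif]
  have hnz : ∀ i ∈ PySem.List.pyRange 1 hm 1, i ≠ 0 := by
    intro i hi
    have := (PySem.List.mem_pyRange_one).1 hi
    omega
  rw [which_sentence, PySem.List.pyRange_one_cons hhm, List.foldl_cons]
  simp only [zero_add]
  rw [hfirst, pv_tail_fold fy pz base hb (PySem.List.pyRange 1 hm 1) hnz [fst]
        ((fst - base) + (if fy ≠ 0 then 2 else (if pz = 1 then 1 else -1))),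
      PySem.List.length_pyRange_one, List.singleton_append]

-- B in the same closed form
theorem pv_alt_eq (fst hm fy pz base : Int) (hbase : base = if fst ≤ 4 then 1 else 5)
    (hhm : 0 < hm) :
    which_sentence_alt fst hm fy pz
      = fst :: (List.range (hm - 1).toNat).map
          (fun (j : Nat) => base + PySem.Int.mod
            ((fst - base) + (if fy ≠ 0 then 2 else (if pz = 1 then 1 else -1))
              + (j : Int) * (if pz = 1 then 1 else -1)) 4) := by
  rw [which_sentence_alt, if_neg (by omega)]
  simp only [← hbase]
  rw [PySem.List.pyRange_one, List.map_map]
  congr 1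
  apply List.map_congr_left
  intro j _
  simp only [Function.comp_apply]
  congr 2
  ring

-- ===== VERDICT (by name: the statement is the Claim_ definition above) =====
theorem which_sentence_spec : Claim_equal_which_sentence := by
  intro fst hm fy pz _ hpre
  unfold Spec_which_sentence
  by_cases hhm : hm ≤ 0
  · rw [which_sentence, PySem.List.pyRange_one_eq_nil (by omega), which_sentence_alt, if_pos hhm]
    rfl
  · have hfst : 1 ≤ fst ∧ fst ≤ 8 := by
      rcases hpre with h | h
      · omega
      · exact h
    by_cases h4 : fst ≤ 4
    · rw [pv_main fst hm fy pz 1 (Or.inl rfl) (by omega) (by omega) (by omega),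
          pv_alt_eq fst hm fy pz 1 (by rw [if_pos h4]) (by omega)]
    · rw [pv_main fst hm fy pz 5 (Or.inr rfl) (by omega) (by omega) (by omega),
          pv_alt_eq fst hm fy pz 5 (by rw [if_neg h4]) (by omega)]
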